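-- pv_equiv track=rewrite | github.com/dougy147/rosalind | 44-kmer/kmer.py | k_mer_composition
-- ===== SOURCE A (Python) =====
-- def k_mer_composition(k,depth=0,current=[],compo=None):
--     if compo == None: compo = []
--     if depth == k:
--         compo.append(current)
--         return
--     for b in ["A","C","G","T"]:
--         k_mer_composition(k,depth+1,current+[b],compo)
--     return compo
-- ===== SOURCE B (Python) =====
-- # Iterative breadth-wise expansion: grow all suffixes one position per pass,
-- # no recursion.  If a list is passed as `compo`, it is extended in place
-- # (same observable mutation as A); return value equivalence is what is claimed.
-- def k_mer_composition(k, depth=0, current=[], compo=None):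
--     if compo is None:
--         compo = []
--     suffixes = [[]]
--     for _ in range(k - depth):
--         suffixes = [s + [b] for s in suffixes for b in "ACGT"]
--     compo.extend(current + s for s in suffixes)
--     return compo
-- ===== Notes on version B (the rewrite author's own statement) =====
-- stated objective: alternative
-- what changed: Replaces the 4-way recursive DFS with an iterative breadth-wise expansion: one pass per remaining position rebuilds the suffix list, then everything is appended to compo at once.
-- outside the precondition, e.g. on k_mer_composition(2, 2, [], None): A returns None, B returns [[]]; on k_mer_composition(1, 2, [], None): A raises RecursionError, B returns [[]]
import Mathlib
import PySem

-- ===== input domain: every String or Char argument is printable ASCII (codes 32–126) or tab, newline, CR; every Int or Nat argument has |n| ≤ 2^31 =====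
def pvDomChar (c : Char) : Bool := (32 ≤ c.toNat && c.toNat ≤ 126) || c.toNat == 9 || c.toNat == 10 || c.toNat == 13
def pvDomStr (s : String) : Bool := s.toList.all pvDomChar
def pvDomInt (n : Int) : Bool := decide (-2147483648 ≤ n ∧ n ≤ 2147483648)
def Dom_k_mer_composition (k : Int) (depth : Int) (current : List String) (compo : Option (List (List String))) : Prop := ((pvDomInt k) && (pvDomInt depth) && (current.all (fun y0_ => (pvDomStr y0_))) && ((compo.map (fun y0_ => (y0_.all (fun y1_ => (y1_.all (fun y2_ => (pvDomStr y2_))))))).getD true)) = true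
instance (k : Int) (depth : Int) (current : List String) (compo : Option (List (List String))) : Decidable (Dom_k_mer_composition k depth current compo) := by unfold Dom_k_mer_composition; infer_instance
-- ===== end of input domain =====

-- B replaces A's recursive DFS by an iterative breadth-wise suffix expansion (alternative
-- algorithm, same cost); if a list is passed as `compo` both Pythons mutate it in place,
-- the equivalence proved here is about the RETURN value.

-- ===== PORT A =====
-- Literal port of A's recursion; the proof argument `h : depth < k` in the loop helper is a
-- totality guard only (Python diverges when depth > k; those inputs are outside Pre_).
mutual
def k_mer_aux (k : Int) (depth : Int) (current : List String) (compo : List (List String)) : List (List String) :=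
  if depth = k then compo ++ [current]                -- compo.append(current); return
  else if h : depth < k then
    k_mer_loop k depth h current compo ["A", "C", "G", "T"]   -- for b in ["A","C","G","T"]: …
  else compo                                          -- depth > k: Python never returns (outside Pre_)
termination_by ((k - depth).toNat, 5)
decreasing_by exact Prod.Lex.right _ (by simp)

def k_mer_loop (k : Int) (depth : Int) (h : depth < k) (current : List String) (compo : List (List String)) (bs : List String) : List (List String) :=
  match bs with
  | [] => compo
  | b :: rest => k_mer_loop k depth h current (k_mer_aux k (depth + 1) (current ++ [b]) compo) rest
termination_by ((k - depth).toNat, bs.length)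
decreasing_by
  · exact Prod.Lex.left _ _ (by omega)
  · exact Prod.Lex.right _ (by simp)
end

def k_mer_composition (k : Int) (depth : Int) (current : List String) (compo : Option (List (List String))) : List (List String) :=
  let c := match compo with | none => [] | some l => l    -- if compo == None: compo = []
  k_mer_aux k depth current c

-- ===== PORT B =====
-- one expansion pass: suffixes = [s + [b] for s in suffixes for b in "ACGT"]
-- ("ACGT" iterated character by character, each character appended as a one-char string)
def kmerStep (sufs : List (List String)) : List (List String) :=
  sufs.flatMap (fun s => ["A", "C", "G", "T"].map (fun b => s ++ [b]))

def k_mer_composition_alt (k : Int) (depth : Int) (current : List String) (compo : Option (List (List String))) : List (List String) :=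
  let c := compo.getD []
  let suffixes := (List.range (k - depth).toNat).foldl (fun sufs _ => kmerStep sufs) [[]]
  c ++ suffixes.map (fun s => current ++ s)

-- ===== PRECONDITION & SPEC =====
-- Pre_ excludes depth = k, where A returns None (not a list: B returns [current]-appended compo
-- there), and depth > k, where A's recursion never terminates (RecursionError).
def Pre_k_mer_composition (k : Int) (depth : Int) (current : List String) (compo : Option (List (List String))) : Prop := depth < k
instance (k : Int) (depth : Int) (current : List String) (compo : Option (List (List String))) : Decidable (Pre_k_mer_composition k depth current compo) := by unfold Pre_k_mer_composition; infer_instance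
def pvWitness_k_mer_composition : Int × Int × List String × Option (List (List String)) := (2, 0, [], none)

def Spec_k_mer_composition (k : Int) (depth : Int) (current : List String) (compo : Option (List (List String))) (out : List (List String)) : Prop := out = k_mer_composition_alt k depth current compo
instance (k : Int) (depth : Int) (current : List String) (compo : Option (List (List String))) (out : List (List String)) : Decidable (Spec_k_mer_composition k depth current compo out) := by unfold Spec_k_mer_composition; infer_instance

-- ===== CLAIM (what is proved, stated in full; the proofs are below) =====
def Claim_equal_k_mer_composition : Prop := ∀ (k : Int) (depth : Int) (current : List String) (compo : Option (List (List String))), Dom_k_mer_composition k depth current compo → Pre_k_mer_composition k depth current compo → Spec_k_mer_composition k depth current compo (k_mer_composition k depth current compo)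

-- ===== LEMMAS AND PROOFS =====

-- all words of length n over the alphabet, built by PREPENDING a letter (A's order)
def expandFront : Nat → List (List String)
  | 0 => [[]]
  | n + 1 => ["A", "C", "G", "T"].flatMap (fun b => (expandFront n).map (fun s => b :: s))

theorem foldl_range_succ (n : Nat) :
    (List.range (n + 1)).foldl (fun sufs _ => kmerStep sufs) [[]]
      = kmerStep ((List.range n).foldl (fun sufs _ => kmerStep sufs) [[]]) := by
  rw [List.range_succ, List.foldl_append]
  rfl

theorem kmerStep_map_cons (b : String) (X : List (List String)) :
    kmerStep (X.map (fun s => b :: s)) = (kmerStep X).map (fun s => b :: s) := by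
  simp [kmerStep, List.flatMap_map, List.map_flatMap]

theorem kmerStep_expandFront (n : Nat) : kmerStep (expandFront n) = expandFront (n + 1) := by
  induction n with
  | zero => decide
  | succ m ih =>
    show kmerStep (expandFront (m + 1)) = expandFront (m + 2)
    rw [expandFront]
    rw [show (kmerStep (["A", "C", "G", "T"].flatMap (fun b => (expandFront m).map (fun s => b :: s))))
        = ["A", "C", "G", "T"].flatMap (fun b => kmerStep ((expandFront m).map (fun s => b :: s))) from by
      simp [kmerStep]]
    simp only [kmerStep_map_cons, ih]
    rfl

theorem foldl_range_eq_expandFront (n : Nat) :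
    (List.range n).foldl (fun sufs _ => kmerStep sufs) [[]] = expandFront n := by
  induction n with
  | zero => rfl
  | succ m ih => rw [foldl_range_succ, ih, kmerStep_expandFront]

theorem k_mer_aux_eq (n : Nat) : ∀ (k depth : Int) (current : List String) (compo : List (List String)),
    depth ≤ k → (k - depth).toNat = n →
    k_mer_aux k depth current compo = compo ++ (expandFront n).map (fun s => current ++ s) := by
  induction n with
  | zero =>
    intro k depth current compo hle hn
    have : depth = k := by omega
    subst this
    rw [k_mer_aux.eq_def]
    simp [expandFront]
  | succ m ih =>
    intro k depth current compo hle hn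
    have hlt : depth < k := by omega
    have hloop : ∀ (bs : List String) (compo : List (List String)),
        k_mer_loop k depth hlt current compo bs
          = compo ++ bs.flatMap (fun b => (expandFront m).map (fun s => (current ++ [b]) ++ s)) := by
      intro bs
      induction bs with
      | nil => intro compo; rw [k_mer_loop.eq_def]; simp
      | cons b rest ihb =>
        intro compo
        rw [k_mer_loop.eq_def]
        simp only []
        rw [ihb, ih k (depth + 1) (current ++ [b]) compo (by omega) (by omega)]
        simp
    rw [k_mer_aux.eq_def]
    rw [if_neg (by omega), dif_pos hlt, hloop]
    show _ = compo ++ (expandFront (m + 1)).map (fun s => current ++ s)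
    rw [expandFront]
    simp [List.map_map, Function.comp_def]

-- ===== VERDICT (by name: the statement is the Claim_ definition above) =====
theorem k_mer_composition_spec : Claim_equal_k_mer_composition := by
  intro k depth current compo _ hpre
  unfold Spec_k_mer_composition k_mer_composition k_mer_composition_alt
  have hle : depth ≤ k := le_of_lt hpre
  cases compo with
  | none =>
    simp only [Option.getD]
    rw [k_mer_aux_eq (k - depth).toNat k depth current [] hle rfl,
        foldl_range_eq_expandFront]
  | some c =>
    simp only [Option.getD]
    rw [k_mer_aux_eq (k - depth).toNat k depth current c hle rfl,
        foldl_range_eq_expandFront]
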